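-- pv_equiv track=rewrite | github.com/yilmazhasan/practice-workspace | Python/String/greedy_string_funcs.py | giveSmallestCharInd
-- ===== SOURCE A (Python) =====
-- def isBeforeCharStrMatch(ss, c, match):
--     ss = [e for e in ss]
--     match = [e for e in match]
--     indC = len(ss)-1
--     while indC >= 0:
--         if ss[indC] == c :
--             break;
--         indC -= 1
--
--     ssSubUntilC = ss[:indC]
--
--     for e in match:
--         try:
--             ssSubUntilC.remove(e)
--         except:
--             return -1;   #means ssSub not contain that char c
--         else:
--             None
--     return indC;
--
-- def giveSmallestCharInd(ss, remaining):
--     i = 0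
--     lenRem = len(remaining)
--     while i < lenRem:
--         c = remaining[i]
--         minCharInd = isBeforeCharStrMatch(ss, c,remaining[:i] + remaining[i+1:])
--         if minCharInd != -1:
--             return minCharInd;
--         i += 1
--
--     return -1;
-- ===== SOURCE B (Python) =====
-- def giveSmallestCharInd(ss, remaining):
--     # last occurrence index of each char in ss
--     last = {}
--     for j, ch in enumerate(ss):
--         last[ch] = j
--     # multiset (char counts) of remaining
--     need = {}
--     for ch in remaining:
--         need[ch] = need.get(ch, 0) + 1
--     # a candidate char c succeeds iff ss[:last[c]] contains remaining-minus-one-c as a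
--     # multiset; this depends only on c, so memoize per char, return last[c] at first success
--     checked = {}
--     for c in remaining:
--         v = checked.get(c)
--         if v is None:
--             j = last.get(c, -1)
--             if j == -1:
--                 v = -1
--             else:
--                 pref = {}
--                 for d in ss[:j]:
--                     pref[d] = pref.get(d, 0) + 1
--                 v = j if all(pref.get(d, 0) >= n - (1 if d == c else 0) for d, n in need.items()) else -1
--             checked[c] = v
--         if v != -1:
--             return v
--     return -1
-- ===== Notes on version B (the rewrite author's own statement) =====
-- stated objective: faster
-- what changed: Replaces A's per-position backward scan + destructive list.remove loop (O(m^2*n)) by one pass building a last-occurrence dict and the count multiset of remaining, then a per-distinct-char count comparison over a prefix counter, memoized per char.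
import Mathlib
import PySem

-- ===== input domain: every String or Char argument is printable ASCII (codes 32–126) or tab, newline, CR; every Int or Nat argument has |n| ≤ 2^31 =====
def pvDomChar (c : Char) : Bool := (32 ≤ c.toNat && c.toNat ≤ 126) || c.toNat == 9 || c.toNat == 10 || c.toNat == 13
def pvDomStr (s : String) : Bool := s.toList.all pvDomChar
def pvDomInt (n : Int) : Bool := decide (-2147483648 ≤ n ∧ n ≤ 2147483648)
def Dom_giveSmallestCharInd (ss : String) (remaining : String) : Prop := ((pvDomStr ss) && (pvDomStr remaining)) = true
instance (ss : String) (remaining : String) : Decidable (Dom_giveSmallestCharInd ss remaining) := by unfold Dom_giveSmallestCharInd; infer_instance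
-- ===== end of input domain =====

-- B replaces A's per-position backward scan + destructive remove loop by a last-occurrence
-- dict, a counter of `remaining` and a memoized per-char prefix-count comparison (faster).

-- ===== PORT A =====
-- Python's backward `while indC >= 0: if ss[indC] == c: break; indC -= 1`; argument n is indC+1
def aFindBack (ss : List Char) (c : Char) : Nat → Int
  | 0 => -1
  | n + 1 => if PySem.List.pyGetD ss (n : Int) ' ' = c then (n : Int) else aFindBack ss c n

-- Python's `for e in match: try: ssSubUntilC.remove(e) except: return -1`
def aRemoveLoop (ms : List Char) (cur : List Char) (indC : Int) : Int :=
  match ms with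
  | [] => indC
  | e :: rest =>
    match PySem.List.remove? cur e with
    | none => -1
    | some cur' => aRemoveLoop rest cur' indC

-- Python's helper converts its string arguments to lists in its first two lines; we take the lists
def isBeforeCharStrMatch (ss : List Char) (c : Char) (mtch : List Char) : Int :=
  let indC := aFindBack ss c ss.length
  let ssSubUntilC := PySem.List.slice ss none (some indC)
  aRemoveLoop mtch ssSubUntilC indC

-- Python's `while i < lenRem` loop over candidate positions i
def aLoop (ssL : List Char) (remL : List Char) (i : Nat) : Int :=
  if h : i < remL.length then
    let c := remL[i]
    let m := PySem.List.slice remL none (some (i : Int)) ++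
             PySem.List.slice remL (some ((i : Int) + 1)) none
    let r := isBeforeCharStrMatch ssL c m
    if r ≠ -1 then r else aLoop ssL remL (i + 1)
  else -1
termination_by remL.length - i

def giveSmallestCharInd (ss : String) (remaining : String) : Int :=
  aLoop ss.toList remaining.toList 0

-- ===== PORT B =====
-- `last = {}; for j, ch in enumerate(ss): last[ch] = j`
def bLast (ssL : List Char) : PySem.Dict Char Int :=
  (PySem.List.enumerate ssL 0).foldl (fun d p => d.insert p.2 p.1) PySem.Dict.empty

-- `d = {}; for x in l: d[x] = d.get(x, 0) + 1`  (the `need` and `pref` loops)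
def bCounter (l : List Char) : PySem.Dict Char Int :=
  l.foldl (fun d x => d.insert x (d.getD x 0 + 1)) PySem.Dict.empty

-- `all(pref.get(d, 0) >= n - (1 if d == c else 0) for d, n in need.items())`
def bCheckAll (pref need : PySem.Dict Char Int) (c : Char) : Bool :=
  need.items.all (fun p => decide (p.2 - (if p.1 = c then 1 else 0) ≤ pref.getD p.1 0))

-- `for c in remaining:` loop with the memo dict `checked`
def bLoop (ssL : List Char) (last need : PySem.Dict Char Int)
    (rem : List Char) (checked : PySem.Dict Char Int) : Int :=
  match rem with
  | [] => -1
  | c :: rest =>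
    let res : Int × PySem.Dict Char Int :=
      match checked.get? c with
      | some v => (v, checked)
      | none =>
        let j := last.getD c (-1)
        let v := if j == -1 then (-1 : Int)
                 else if bCheckAll (bCounter (PySem.List.slice ssL none (some j))) need c
                 then j else -1
        (v, checked.insert c v)
    if res.1 ≠ -1 then res.1 else bLoop ssL last need rest res.2

def giveSmallestCharInd_alt (ss : String) (remaining : String) : Int :=
  let ssL := ss.toList
  bLoop ssL (bLast ssL) (bCounter remaining.toList) remaining.toList PySem.Dict.empty

-- ===== PRECONDITION & SPEC =====
def Spec_giveSmallestCharInd (ss : String) (remaining : String) (out : Int) : Prop := out = giveSmallestCharInd_alt ss remaining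
instance (ss : String) (remaining : String) (out : Int) : Decidable (Spec_giveSmallestCharInd ss remaining out) := by unfold Spec_giveSmallestCharInd; infer_instance

-- ===== CLAIM (what is proved, stated in full; the proofs are below) =====
def Claim_equal_giveSmallestCharInd : Prop := ∀ (ss : String) (remaining : String), Dom_giveSmallestCharInd ss remaining → Spec_giveSmallestCharInd ss remaining (giveSmallestCharInd ss remaining)

-- ===== LEMMAS AND PROOFS =====

-- the pure per-candidate value B's memoized loop caches (proof-only)
def chk (ssL : List Char) (last need : PySem.Dict Char Int) (c : Char) : Int :=
  let j := last.getD c (-1)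
  if j == -1 then (-1 : Int)
  else if bCheckAll (bCounter (PySem.List.slice ssL none (some j))) need c then j else -1

-- the common first-hit loop both ports reduce to (proof-only)
def pureLoop (f : Char → Int) : List Char → Int
  | [] => -1
  | c :: r => if f c ≠ -1 then f c else pureLoop f r

theorem aFindBack_ge (ss : List Char) (c : Char) (n : Nat) : -1 ≤ aFindBack ss c n := by
  induction n with
  | zero => simp [aFindBack]
  | succ n ih => simp only [aFindBack]; split <;> omega

theorem aFindBack_stable (ss : List Char) (a c : Char) (n : Nat) (h : n ≤ ss.length) :
    aFindBack (ss ++ [a]) c n = aFindBack ss c n := by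
  induction n with
  | zero => rfl
  | succ n ih =>
    simp only [aFindBack, PySem.List.pyGetD_natCast]
    rw [List.getD_append _ _ _ _ (by omega)]
    rw [ih (by omega)]

theorem bLast_getD (ssL : List Char) (c : Char) :
    (bLast ssL).getD c (-1) = aFindBack ssL c ssL.length := by
  induction ssL using List.reverseRecOn with
  | nil => rfl
  | append_singleton ss a ih =>
    have hb : bLast (ss ++ [a]) = (bLast ss).insert a (ss.length : Int) := by
      simp [bLast, PySem.List.enumerate_append, List.foldl_append, PySem.List.enumerate]
    have hlen : (ss ++ [a]).length = ss.length + 1 := by simp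
    rw [hb, hlen]
    simp only [aFindBack, PySem.List.pyGetD_natCast]
    have hga : (ss ++ [a]).getD ss.length ' ' = a := by simp
    rw [hga, aFindBack_stable ss a c ss.length le_rfl, PySem.Dict.getD_insert]
    by_cases hc : c = a <;> simp [hc, eq_comm, ih]

theorem aRemoveLoop_eq (ms cur : List Char) (j : Int) :
    aRemoveLoop ms cur j = if ∀ d ∈ ms, ms.count d ≤ cur.count d then j else -1 := by
  induction ms generalizing cur with
  | nil => simp [aRemoveLoop]
  | cons e rest ih =>
    simp only [aRemoveLoop]
    by_cases he : e ∈ cur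
    · simp only [PySem.List.remove?_eq_some_erase cur e he]
      rw [ih]
      have hpos : 0 < cur.count e := List.count_pos_iff.2 he
      have key : (∀ d ∈ rest, rest.count d ≤ (cur.erase e).count d) ↔
          (∀ d ∈ e :: rest, (e :: rest).count d ≤ cur.count d) := by
        constructor
        · intro h d hd
          rcases List.mem_cons.1 hd with rfl | hd'
          · have h2 : rest.count d ≤ (cur.erase d).count d := by
              by_cases hdr : d ∈ rest
              · exact h d hdr
              · simp [List.count_eq_zero.2 hdr]
            rw [List.count_erase] at h2
            simp only [List.count_cons]
            simp only [beq_self_eq_true, if_true] at *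
            omega
          · have h2 := h d hd'
            rw [List.count_erase] at h2
            simp only [List.count_cons]
            by_cases hde : e = d
            · subst hde
              simp only [beq_self_eq_true, if_true] at h2 ⊢
              omega
            · simp only [beq_iff_eq, hde, if_false] at h2 ⊢
              omega
        · intro h d hd
          have h2 := h d (List.mem_cons_of_mem _ hd)
          rw [List.count_erase]
          simp only [List.count_cons] at h2
          by_cases hde : e = d
          · subst hde
            simp only [beq_self_eq_true, if_true] at h2 ⊢
            omega
          · simp only [beq_iff_eq, hde, if_false] at h2 ⊢
            omega
      by_cases hcond : ∀ d ∈ e :: rest, (e :: rest).count d ≤ cur.count d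
      · rw [if_pos (key.2 hcond), if_pos hcond]
      · rw [if_neg (fun h => hcond (key.1 h)), if_neg hcond]
    · simp only [(PySem.List.remove?_eq_none_iff cur e).2 he]
      rw [if_neg]
      intro h
      have := h e (List.mem_cons_self ..)
      simp [List.count_eq_zero.2 he] at this

theorem count_split (remL : List Char) (i : Nat) (hi : i < remL.length) (d : Char) :
    remL.count d = (remL.take i ++ remL.drop (i + 1)).count d +
      (if d = remL[i] then 1 else 0) := by
  conv_lhs => rw [← List.take_append_drop i remL, List.drop_eq_getElem_cons hi]
  simp only [List.count_append, List.count_cons]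
  by_cases hd : d = remL[i]
  · rw [if_pos hd, hd]
    simp only [beq_self_eq_true, if_true]
    omega
  · rw [if_neg hd, beq_eq_false_iff_ne.2 (Ne.symm hd)]
    simp

theorem cond_equiv (P remL : List Char) (i : Nat) (hi : i < remL.length) :
    (bCheckAll (PySem.Dict.counter P) (PySem.Dict.counter remL) remL[i] = true) ↔
    (∀ d ∈ remL.take i ++ remL.drop (i + 1),
       (remL.take i ++ remL.drop (i + 1)).count d ≤ P.count d) := by
  unfold bCheckAll
  rw [PySem.Dict.items_counter, List.all_map, List.all_eq_true]
  have hstep : ∀ d : Char,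
      ((fun p => decide (p.2 - (if p.1 = remL[i] then 1 else 0) ≤
          (PySem.Dict.counter P).getD p.1 0)) ∘
        (fun k => (k, (List.count k remL : Int)))) d = true ↔
      ((List.count d remL : Int) - (if d = remL[i] then 1 else 0) ≤
        (List.count d P : Int)) := by
    intro d
    simp only [Function.comp, PySem.Dict.getD_counter, decide_eq_true_eq]
  constructor
  · intro h d hd
    have hdrem : d ∈ remL := by
      rcases List.mem_append.1 hd with h' | h'
      · exact List.mem_of_mem_take h'
      · exact List.mem_of_mem_drop h'
    have h2 := (hstep d).1 (h d ((PySem.Set.mem_ofList remL d).2 hdrem))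
    have hc := count_split remL i hi d
    by_cases hde : d = remL[i]
    · rw [if_pos hde] at h2 hc
      omega
    · rw [if_neg hde] at h2 hc
      omega
  · intro h d hd
    rw [hstep d]
    have hc := count_split remL i hi d
    by_cases hdm : d ∈ remL.take i ++ remL.drop (i + 1)
    · have h2 := h d hdm
      by_cases hde : d = remL[i]
      · rw [if_pos hde] at hc ⊢
        omega
      · rw [if_neg hde] at hc ⊢
        omega
    · have h0 : (remL.take i ++ remL.drop (i + 1)).count d = 0 := List.count_eq_zero.2 hdm
      by_cases hde : d = remL[i]
      · rw [if_pos hde] at hc ⊢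
        omega
      · rw [if_neg hde] at hc ⊢
        omega

theorem bCounter_eq (l : List Char) : bCounter l = PySem.Dict.counter l :=
  PySem.Dict.foldl_insert_getD_add_one_eq_counter l

theorem chk_eq_isBefore (ssL remL : List Char) (i : Nat) (hi : i < remL.length) :
    isBeforeCharStrMatch ssL remL[i]
        (PySem.List.slice remL none (some (i : Int)) ++
         PySem.List.slice remL (some ((i : Int) + 1)) none) =
      chk ssL (bLast ssL) (bCounter remL) remL[i] := by
  have hm2 : PySem.List.slice remL (some ((i : Int) + 1)) none = remL.drop (i + 1) := by
    have h1 : ((i : Int) + 1) = ((i + 1 : Nat) : Int) := by push_cast; ring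
    rw [h1, PySem.List.slice_from_natCast]
  unfold isBeforeCharStrMatch chk
  rw [bLast_getD, PySem.List.slice_to_natCast, hm2, bCounter_eq]
  have hge := aFindBack_ge ssL remL[i] ssL.length
  by_cases hneg : aFindBack ssL remL[i] ssL.length = -1
  · rw [hneg]
    simp only [beq_self_eq_true, if_true]
    rw [aRemoveLoop_eq]
    split <;> rfl
  · obtain ⟨k, hk⟩ : ∃ k : Nat, aFindBack ssL remL[i] ssL.length = (k : Int) :=
      ⟨(aFindBack ssL remL[i] ssL.length).toNat, (Int.toNat_of_nonneg (by omega)).symm⟩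
    rw [hk]
    have hbeq : ((k : Int) == -1) = false := by
      simp only [beq_eq_false_iff_ne, ne_eq]
      omega
    simp only [hbeq, Bool.false_eq_true, if_false, PySem.List.slice_to_natCast,
      bCounter_eq, aRemoveLoop_eq]
    by_cases hcond : ∀ d ∈ remL.take i ++ remL.drop (i + 1),
        (remL.take i ++ remL.drop (i + 1)).count d ≤ (ssL.take k).count d
    · rw [if_pos hcond, if_pos ((cond_equiv (ssL.take k) remL i hi).2 hcond)]
    · rw [if_neg hcond,
        if_neg (fun h => hcond ((cond_equiv (ssL.take k) remL i hi).1 h))]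

theorem aLoop_eq (ssL remL : List Char) (i : Nat) :
    aLoop ssL remL i = pureLoop (chk ssL (bLast ssL) (bCounter remL)) (remL.drop i) := by
  rw [aLoop]
  by_cases h : i < remL.length
  · simp only [dif_pos h]
    rw [List.drop_eq_getElem_cons h, pureLoop]
    simp only [chk_eq_isBefore ssL remL i h]
    rw [aLoop_eq ssL remL (i + 1)]
  · simp only [dif_neg h]
    rw [List.drop_eq_nil_of_le (by omega), pureLoop]
termination_by remL.length - i

theorem bLoop_eq (ssL : List Char) (last need : PySem.Dict Char Int) (rem : List Char)
    (checked : PySem.Dict Char Int)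
    (inv : ∀ c v, checked.get? c = some v → v = chk ssL last need c) :
    bLoop ssL last need rem checked = pureLoop (chk ssL last need) rem := by
  induction rem generalizing checked with
  | nil => rfl
  | cons c rest ih =>
    rw [bLoop, pureLoop]
    cases hget : checked.get? c with
    | some v =>
      rw [inv c v hget]
      show (if chk ssL last need c ≠ -1 then chk ssL last need c
            else bLoop ssL last need rest checked) = _
      rw [ih checked inv]
    | none =>
      have hinv' : ∀ c' v',
          (checked.insert c (chk ssL last need c)).get? c' = some v' →
          v' = chk ssL last need c' := by
        intro c' v' hgv
        rw [PySem.Dict.get?_insert] at hgv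
        by_cases hcc : c' = c
        · rw [if_pos hcc] at hgv
          cases hgv
          rw [hcc]
        · rw [if_neg hcc] at hgv
          exact inv c' v' hgv
      show (if chk ssL last need c ≠ -1 then chk ssL last need c
            else bLoop ssL last need rest (checked.insert c (chk ssL last need c))) = _
      rw [ih _ hinv']

-- ===== VERDICT (by name: the statement is the Claim_ definition above) =====
theorem giveSmallestCharInd_spec : Claim_equal_giveSmallestCharInd := by
  intro ss remaining _
  unfold Spec_giveSmallestCharInd giveSmallestCharInd giveSmallestCharInd_alt
  rw [aLoop_eq, bLoop_eq _ _ _ _ _ (by intro c v h; simp [PySem.Dict.get?_empty] at h)]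
  simp
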